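-- pv_equiv track=rewrite | github.com/christophertbrown/bioscripts | ctbBio/fastq2fasta.py | fq2fa
-- ===== SOURCE A (Python) =====
-- from itertools import cycle
--
-- def fq2fa(fq):
--     """
--     convert fq to fa
--     """
--     c = cycle([1, 2, 3, 4])
--     for line in fq:
--         n = next(c)
--         if n == 1:
--             seq = ['>%s' % (line.strip().split('@', 1)[1])]
--         if n == 2:
--             seq.append(line.strip())
--             yield seq
-- ===== SOURCE B (Python) =====
-- def fq2fa(fq):
--     """
--     convert fq to fa
--     """
--     lines = list(fq)
--     headers = [l for i, l in enumerate(lines) if i % 4 == 0]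
--     seqs = [l for i, l in enumerate(lines) if i % 4 == 1]
--     for h, s in zip(headers, seqs):
--         yield ['>%s' % h.strip().split('@', 1)[1], s.strip()]
-- ===== Notes on version B (the rewrite author's own statement) =====
-- stated objective: alternative
-- what changed: Replaces the per-line cycle(1..4) state machine with staged passes: select the header lines (index % 4 == 0) and sequence lines (index % 4 == 1) into two lists, then zip them and format each pair; zip's truncation reproduces A's silent drop of a lone trailing header.
import Mathlib
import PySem

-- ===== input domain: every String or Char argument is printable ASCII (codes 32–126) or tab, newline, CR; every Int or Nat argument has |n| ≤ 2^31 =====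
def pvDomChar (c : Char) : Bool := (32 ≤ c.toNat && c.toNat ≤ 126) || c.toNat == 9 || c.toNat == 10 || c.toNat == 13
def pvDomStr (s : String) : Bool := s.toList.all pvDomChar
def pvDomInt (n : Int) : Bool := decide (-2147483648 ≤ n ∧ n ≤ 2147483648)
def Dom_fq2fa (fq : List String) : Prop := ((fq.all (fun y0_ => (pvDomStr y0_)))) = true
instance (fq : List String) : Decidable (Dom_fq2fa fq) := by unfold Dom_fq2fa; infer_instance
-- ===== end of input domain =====

-- B replaces A's per-line cyclic state machine by staged passes (select by index mod 4, then zip); same output, same cost.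

-- ===== PORT A =====
-- '>%s' % (line.strip().split('@', 1)[1]); the [1] indexing raises IndexError when '@' is absent — Pre_ excludes that, getD "" is never reached inside Pre_
def pvHdrA (line : String) : String :=
  ">" ++ ((PySem.List.pyGet? ((PySem.Str.splitMax? (PySem.Str.strip line) "@" 1).getD []) 1).getD "")

-- the cycle([1,2,3,4]) loop: state = next cycle value n and the current seq list
def fq2faGo : List String → Nat → List String → List (List String)
  | [], _, _ => []
  | line :: rest, n, seq =>
    if n == 1 then
      fq2faGo rest 2 [pvHdrA line]
    else if n == 2 then
      let seq2 := seq ++ [PySem.Str.strip line]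
      seq2 :: fq2faGo rest 3 seq2
    else
      fq2faGo rest (if n == 4 then 1 else n + 1) seq

def fq2fa (fq : List String) : List (List String) := fq2faGo fq 1 []

-- ===== PORT B =====
def pvHdrB (header : String) : String :=
  ">" ++ ((PySem.List.pyGet? ((PySem.Str.splitMax? (PySem.Str.strip header) "@" 1).getD []) 1).getD "")

-- staged passes: header lines (i % 4 == 0), sequence lines (i % 4 == 1), zip, format
def fq2fa_alt (fq : List String) : List (List String) :=
  let headers := ((PySem.List.enumerate fq 0).filter (fun p => p.1 % 4 == 0)).map Prod.snd
  let seqs := ((PySem.List.enumerate fq 0).filter (fun p => p.1 % 4 == 1)).map Prod.snd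
  (headers.zip seqs).map (fun p => [pvHdrB p.1, PySem.Str.strip p.2])

-- ===== PRECONDITION & SPEC =====
-- Pre_ excludes inputs where A raises IndexError: a line at an index ≡ 0 (mod 4) whose stripped text contains no '@'.
def Pre_fq2fa (fq : List String) : Prop :=
  ∀ i, i < fq.length → i % 4 = 0 → PySem.Str.isIn "@" (PySem.Str.strip (fq.getD i "")) = true
instance (fq : List String) : Decidable (Pre_fq2fa fq) := by unfold Pre_fq2fa; infer_instance

def pvWitness_fq2fa : List String := ["@r1", "ACGT", "+", "IIII", "@r2", "TT"]

def Spec_fq2fa (fq : List String) (out : List (List String)) : Prop := out = fq2fa_alt fq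
instance (fq : List String) (out : List (List String)) : Decidable (Spec_fq2fa fq out) := by unfold Spec_fq2fa; infer_instance

-- ===== CLAIM (what is proved, stated in full; the proofs are below) =====
def Claim_equal_fq2fa : Prop := ∀ (fq : List String), Dom_fq2fa fq → Pre_fq2fa fq → Spec_fq2fa fq (fq2fa fq)

-- ===== LEMMAS AND PROOFS =====
theorem pvHdr_eq (s : String) : pvHdrA s = pvHdrB s := rfl

-- the two selection passes, generalized over the enumerate start index
def pvSel (m : Int) (s : Int) (l : List String) : List String :=
  ((PySem.List.enumerate l s).filter (fun p => p.1 % 4 == m)).map Prod.snd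

theorem pvSel_nil (m s : Int) : pvSel m s [] = [] := by
  simp [pvSel, PySem.List.enumerate_nil]

theorem pvSel_cons (m s : Int) (x : String) (l : List String) :
    pvSel m s (x :: l) = (if s % 4 == m then [x] else []) ++ pvSel m (s + 1) l := by
  simp only [pvSel, PySem.List.enumerate_cons, List.filter_cons]
  split <;> simp_all

theorem pvSel_congr (m : Int) (s t : Int) (l : List String) (h : s % 4 = t % 4) :
    pvSel m s l = pvSel m t l := by
  induction l generalizing s t with
  | nil => simp [pvSel_nil]
  | cons x l ih =>
    rw [pvSel_cons, pvSel_cons, h, ih (s + 1) (t + 1) (by omega)]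

theorem fq2fa_alt_eq (fq : List String) :
    fq2fa_alt fq = ((pvSel 0 0 fq).zip (pvSel 1 0 fq)).map
      (fun p => [pvHdrB p.1, PySem.Str.strip p.2]) := rfl

-- proof-only recursion skeleton giving 4-chunk induction
def pvChunk4 : List String → Unit
  | [] | [_] | [_, _] | [_, _, _] => ()
  | _ :: _ :: _ :: _ :: r => pvChunk4 r

theorem sel0_chunk (a b c d : String) (r : List String) :
    pvSel 0 0 (a :: b :: c :: d :: r) = a :: pvSel 0 0 r := by
  have h : pvSel 0 (0+1+1+1+1) r = pvSel 0 0 r := pvSel_congr 0 (0+1+1+1+1) 0 r (by norm_num)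
  rw [pvSel_cons, pvSel_cons, pvSel_cons, pvSel_cons, h]
  norm_num

theorem sel1_chunk (a b c d : String) (r : List String) :
    pvSel 1 0 (a :: b :: c :: d :: r) = b :: pvSel 1 0 r := by
  have h : pvSel 1 (0+1+1+1+1) r = pvSel 1 0 r := pvSel_congr 1 (0+1+1+1+1) 0 r (by norm_num)
  rw [pvSel_cons, pvSel_cons, pvSel_cons, pvSel_cons, h]
  norm_num

theorem go_eq (fq : List String) : ∀ seq, fq2faGo fq 1 seq = fq2fa_alt fq := by
  induction fq using pvChunk4.induct with
  | case1 => intro seq; simp [fq2faGo, fq2fa_alt]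
  | case2 a => intro seq; simp [fq2faGo, fq2fa_alt, PySem.List.enumerate_cons, PySem.List.enumerate_nil]
  | case3 a b =>
    intro seq
    simp [fq2faGo, fq2fa_alt, PySem.List.enumerate_cons, PySem.List.enumerate_nil, pvHdr_eq]
  | case4 a b c =>
    intro seq
    simp [fq2faGo, fq2fa_alt, PySem.List.enumerate_cons, PySem.List.enumerate_nil, pvHdr_eq]
  | case5 a b c d r ih =>
    intro seq
    have hA : fq2faGo (a :: b :: c :: d :: r) 1 seq
        = [pvHdrA a, PySem.Str.strip b] :: fq2faGo r 1 [pvHdrA a, PySem.Str.strip b] := by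
      simp [fq2faGo]
    rw [hA, ih _, fq2fa_alt_eq (a :: b :: c :: d :: r), sel0_chunk, sel1_chunk,
        List.zip_cons_cons, List.map_cons, ← fq2fa_alt_eq, pvHdr_eq]

-- ===== VERDICT (by name: the statement is the Claim_ definition above) =====
theorem fq2fa_spec : Claim_equal_fq2fa := by
  intro fq _ _
  unfold Spec_fq2fa fq2fa
  exact go_eq fq []
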